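-- pv_equiv track=rewrite | github.com/epiksel/jquery-migrate | main.py | transform_proxy
-- ===== SOURCE A (Python) =====
-- def parse_args(s):
--     """'arg1, arg2, ...' → ['arg1', 'arg2', ...] (splits on top-level commas only)"""
--     args, current, depth = [], [], 0
--     for ch in s:
--         if ch in "([{":
--             depth += 1
--             current.append(ch)
--         elif ch in ")]}":
--             depth -= 1
--             current.append(ch)
--         elif ch == ',' and depth == 0:
--             args.append(''.join(current).strip())
--             current = []
--         else:
--             current.append(ch)
--     if current:
--         args.append(''.join(current).strip())
--     return args
--
-- def find_close_paren(content, open_pos):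
--     """Assumes content[open_pos] == '('. Returns the position after the matching ')'."""
--     assert content[open_pos] == '(', f"Expected '(' but found '{content[open_pos]}'"
--     depth, i = 1, open_pos + 1
--     while i < len(content) and depth > 0:
--         if content[i] == '(':
--             depth += 1
--         elif content[i] == ')':
--             depth -= 1
--         i += 1
--     return i  # position after ')'
--
-- def transform_proxy(content):
--     needle = '$.proxy('
--     result, i = [], 0
--     while i < len(content):
--         pos = content.find(needle, i)
--         if pos == -1:
--             result.append(content[i:])
--             break
--         result.append(content[i:pos])
--         end = find_close_paren(content, pos + len(needle) - 1)
--         inner = content[pos + len(needle): end - 1]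
--         args = parse_args(inner)
--         if len(args) >= 2:
--             fn, ctx = args[0], args[1]
--             extra = (', ' + ', '.join(args[2:])) if len(args) > 2 else ''
--             result.append(f"{fn}.bind({ctx}{extra})")
--         else:
--             result.append(content[pos:end])
--         i = end
--     return ''.join(result)
-- ===== SOURCE B (Python) =====
-- def transform_proxy(content):
--     needle = '$.proxy('
--     out = []
--     k = 0              # needle chars currently matched (scanning mode)
--     incall = False
--     raw = args = cur = None
--     pend = None        # last in-call char, committed one step later (the final
--                        # delimiter of a call's text is thereby never part of the args)
--     dpar = dbr = 0
--     for ch in content: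
--         if incall:
--             raw.append(ch)
--             if pend is not None:
--                 c = pend
--                 if c in "([{":
--                     dbr += 1
--                     cur.append(c)
--                 elif c in ")]}":
--                     dbr -= 1
--                     cur.append(c)
--                 elif c == ',' and dbr == 0:
--                     args.append(''.join(cur).strip())
--                     cur = []
--                 else:
--                     cur.append(c)
--             if ch == '(':
--                 dpar += 1
--             elif ch == ')':
--                 dpar -= 1
--             if ch == ')' and dpar == 0:
--                 if cur:
--                     args.append(''.join(cur).strip())
--                 if len(args) >= 2:
--                     extra = ', ' + ', '.join(args[2:]) if len(args) > 2 else ''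
--                     out.append(f"{args[0]}.bind({args[1]}{extra})")
--                 else:
--                     out.append(''.join(raw))
--                 incall = False
--                 pend = None
--             else:
--                 pend = ch
--         elif ch == needle[k]:
--             k += 1
--             if k == len(needle):
--                 incall = True
--                 raw = list(needle)
--                 args = []
--                 cur = []
--                 pend = None
--                 dpar = 1
--                 dbr = 0
--                 k = 0
--         else:
--             out.append(needle[:k])
--             if ch == '$':
--                 k = 1
--             else:
--                 out.append(ch)
--                 k = 0
--     if incall:
--         if cur:
--             args.append(''.join(cur).strip())
--         if len(args) >= 2:
--             extra = ', ' + ', '.join(args[2:]) if len(args) > 2 else ''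
--             out.append(f"{args[0]}.bind({args[1]}{extra})")
--         else:
--             out.append(''.join(raw))
--     else:
--         out.append(needle[:k])
--     return ''.join(out)
-- ===== Notes on version B (the rewrite author's own statement) =====
-- stated objective: alternative
-- what changed: B replaces A's repeated find('$.proxy(') / find_close_paren / slice / parse_args region machinery by a single left-to-right pass over the characters, keeping a needle-match index and, inside a call, a raw-text buffer, a paren-depth counter and an on-the-fly top-level-comma argument splitter whose commits lag one character so the call's final delimiter never enters the args.
import Mathlib
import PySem

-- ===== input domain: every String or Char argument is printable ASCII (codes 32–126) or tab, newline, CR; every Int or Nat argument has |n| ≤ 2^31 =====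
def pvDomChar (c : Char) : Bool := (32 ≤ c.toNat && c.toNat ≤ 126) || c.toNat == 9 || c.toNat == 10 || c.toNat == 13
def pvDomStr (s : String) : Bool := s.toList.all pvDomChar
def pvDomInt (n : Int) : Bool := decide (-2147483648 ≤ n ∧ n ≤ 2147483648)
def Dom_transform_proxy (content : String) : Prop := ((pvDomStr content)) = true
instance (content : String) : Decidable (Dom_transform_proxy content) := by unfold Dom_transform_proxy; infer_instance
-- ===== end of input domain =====

-- B replaces A's find/slice/re-parse region machinery by a single left-to-right pass over the
-- characters with a needle-match index, a paren-depth counter and an on-the-fly argument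
-- splitter (objective: alternative decomposition, not claimed faster).

-- ===== PORT A =====
def needleA : List Char := ['$', '.', 'p', 'r', 'o', 'x', 'y', '(']

-- parse_args' loop body
def parseStepA (st : List (List Char) × List Char × Int) (ch : Char) :
    List (List Char) × List Char × Int :=
  if ch = '(' ∨ ch = '[' ∨ ch = '{' then (st.1, st.2.1 ++ [ch], st.2.2 + 1)
  else if ch = ')' ∨ ch = ']' ∨ ch = '}' then (st.1, st.2.1 ++ [ch], st.2.2 - 1)
  else if ch = ',' ∧ st.2.2 = 0 then (st.1 ++ [PySem.Chars.strip st.2.1], [], st.2.2)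
  else (st.1, st.2.1 ++ [ch], st.2.2)

def parseArgsA (s : List Char) : List (List Char) :=
  let st := s.foldl parseStepA ([], [], 0)
  if st.2.1 ≠ [] then st.1 ++ [PySem.Chars.strip st.2.1] else st.1

-- find_close_paren's while loop
def findCloseGoA (content : List Char) (i : Nat) (depth : Int) : Nat :=
  if h : i < content.length ∧ 0 < depth then
    let c := content.getD i ' '
    findCloseGoA content (i + 1)
      (if c = '(' then depth + 1 else if c = ')' then depth - 1 else depth)
  else i
termination_by content.length - i
decreasing_by omega

def findCloseParenA (content : List Char) (openPos : Nat) : Nat :=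
  findCloseGoA content (openPos + 1) 1

-- cited by tpGoA's decreasing_by
theorem findCloseGoA_ge (content : List Char) (i : Nat) (depth : Int) :
    i ≤ findCloseGoA content i depth := by
  rw [findCloseGoA]
  split
  next h =>
    exact Nat.le_trans (Nat.le_succ i) (findCloseGoA_ge content (i + 1) _)
  next => exact Nat.le_refl _
termination_by content.length - i
decreasing_by omega

-- cited by tpGoA's decreasing_by
theorem tpGoA_dec (content : List Char) (i : Nat) (hi : i < content.length)
    (hpos : ¬ PySem.Chars.findFrom content needleA (i : Int) none = -1) :
    content.length -
        findCloseParenA content ((PySem.Chars.findFrom content needleA (i : Int) none).toNat + 7)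
      < content.length - i := by
  have h1 := (PySem.Chars.findFrom_natCast_spec content needleA i (by omega) hpos).1
  have h2 := findCloseGoA_ge content
    ((PySem.Chars.findFrom content needleA (i : Int) none).toNat + 7 + 1) 1
  simp only [findCloseParenA]
  omega

-- transform_proxy's while loop (result accumulator carried, joined by the wrapper)
def tpGoA (content : List Char) (i : Nat) (acc : List (List Char)) : List (List Char) :=
  if hi : i < content.length then
    let pos := PySem.Chars.findFrom content needleA (i : Int) none
    if hpos : pos = -1 then acc ++ [PySem.List.slice content (some (i : Int)) none]
    else
      let e := findCloseParenA content (pos.toNat + 7)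
      let inner := PySem.List.slice content (some ((pos.toNat : Int) + 8)) (some ((e : Int) - 1))
      let args := parseArgsA inner
      let piece :=
        if 2 ≤ args.length then
          (args.getD 0 []) ++ ".bind(".toList ++ (args.getD 1 []) ++
            (if 2 < args.length then ", ".toList ++ PySem.Chars.join ", ".toList (args.drop 2)
             else []) ++ [')']
        else PySem.List.slice content (some (pos.toNat : Int)) (some (e : Int))
      tpGoA content e (acc ++ [PySem.List.slice content (some (i : Int)) (some pos)] ++ [piece])
  else acc
termination_by content.length - i
decreasing_by exact tpGoA_dec content i hi hpos

def transform_proxy (content : String) : String :=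
  String.ofList (PySem.Chars.join [] (tpGoA content.toList 0 []))

-- ===== PORT B =====
def needleB : List Char := ['$', '.', 'p', 'r', 'o', 'x', 'y', '(']

structure PvBSt where
  out : List (List Char)
  k : Nat
  incall : Bool
  raw : List Char
  args : List (List Char)
  cur : List Char
  pend : Option Char
  dpar : Int
  dbr : Int

-- the body of Source B's for-loop
def bStep (st : PvBSt) (ch : Char) : PvBSt :=
  if st.incall then
    let raw := st.raw ++ [ch]
    let t :=
      match st.pend with
      | none => (st.args, st.cur, st.dbr)
      | some c =>
        if c = '(' ∨ c = '[' ∨ c = '{' then (st.args, st.cur ++ [c], st.dbr + 1)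
        else if c = ')' ∨ c = ']' ∨ c = '}' then (st.args, st.cur ++ [c], st.dbr - 1)
        else if c = ',' ∧ st.dbr = 0 then (st.args ++ [PySem.Chars.strip st.cur], [], st.dbr)
        else (st.args, st.cur ++ [c], st.dbr)
    let dpar := if ch = '(' then st.dpar + 1 else if ch = ')' then st.dpar - 1 else st.dpar
    if ch = ')' ∧ dpar = 0 then
      let args2 := if t.2.1 ≠ [] then t.1 ++ [PySem.Chars.strip t.2.1] else t.1
      let piece :=
        if 2 ≤ args2.length then
          (args2.getD 0 []) ++ ".bind(".toList ++ (args2.getD 1 []) ++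
            (if 2 < args2.length then ", ".toList ++ PySem.Chars.join ", ".toList (args2.drop 2)
             else []) ++ [')']
        else raw
      { out := st.out ++ [piece], k := st.k, incall := false, raw := raw,
        args := t.1, cur := t.2.1, pend := none, dpar := dpar, dbr := t.2.2 }
    else
      { out := st.out, k := st.k, incall := true, raw := raw,
        args := t.1, cur := t.2.1, pend := some ch, dpar := dpar, dbr := t.2.2 }
  else if ch = needleB.getD st.k ' ' then
    if st.k + 1 = needleB.length then
      { out := st.out, k := 0, incall := true, raw := needleB,
        args := [], cur := [], pend := none, dpar := 1, dbr := 0 }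
    else { st with k := st.k + 1 }
  else
    let out := st.out ++ [needleB.take st.k]
    if ch = '$' then { st with out := out, k := 1 }
    else { st with out := out ++ [[ch]], k := 0 }

-- the flush after Source B's loop
def bFinal (st : PvBSt) : List (List Char) :=
  if st.incall then
    let args2 := if st.cur ≠ [] then st.args ++ [PySem.Chars.strip st.cur] else st.args
    let piece :=
      if 2 ≤ args2.length then
        (args2.getD 0 []) ++ ".bind(".toList ++ (args2.getD 1 []) ++
          (if 2 < args2.length then ", ".toList ++ PySem.Chars.join ", ".toList (args2.drop 2)
           else []) ++ [')']
      else st.raw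
    st.out ++ [piece]
  else st.out ++ [needleB.take st.k]

def transform_proxy_alt (content : String) : String :=
  String.ofList (PySem.Chars.join []
    (bFinal (content.toList.foldl bStep ⟨[], 0, false, [], [], [], none, 0, 0⟩)))

-- ===== PRECONDITION & SPEC =====
def Spec_transform_proxy (content : String) (out : String) : Prop := out = transform_proxy_alt content
instance (content : String) (out : String) : Decidable (Spec_transform_proxy content out) := by unfold Spec_transform_proxy; infer_instance

-- ===== CLAIM (what is proved, stated in full; the proofs are below) =====
def Claim_equal_transform_proxy : Prop := ∀ (content : String), Dom_transform_proxy content → Spec_transform_proxy content (transform_proxy content)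

-- ===== LEMMAS AND PROOFS =====

-- join with empty separator is flatten
theorem pvJoinNil (ps : List (List Char)) : PySem.Chars.join [] ps = ps.flatten := by
  show List.intercalate [] ps = ps.flatten
  unfold List.intercalate
  induction ps with
  | nil => rfl
  | cons p ps ih =>
    cases ps with
    | nil => rfl
    | cons q qs => simp [List.intersperse] at ih ⊢; simpa using ih

-- depth update performed by find_close_paren's scan
def updD (d : Int) (c : Char) : Int := if c = '(' then d + 1 else if c = ')' then d - 1 else d

-- number of characters find_close_paren's scan consumes, relative to the scan start
def closeLen : List Char → Int → Nat
  | [], _ => 0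
  | c :: r, d => if 0 < d then 1 + closeLen r (updD d c) else 0

theorem closeLen_nonpos (x : List Char) {d : Int} (hd : d ≤ 0) : closeLen x d = 0 := by
  cases x with
  | nil => rfl
  | cons c r => simp [closeLen]; omega

theorem closeLen_le (x : List Char) (d : Int) : closeLen x d ≤ x.length := by
  induction x generalizing d with
  | nil => simp [closeLen]
  | cons c r ih =>
    simp only [closeLen]
    split
    · have := ih (updD d c); simp only [List.length_cons]; omega
    · simp

-- the call's text as the spec sees it: emit the rewritten call or the raw text
def emitCallS (body : List Char) : List Char :=
  let args := parseArgsA body.dropLast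
  if 2 ≤ args.length then
    (args.getD 0 []) ++ ".bind(".toList ++ (args.getD 1 []) ++
      (if 2 < args.length then ", ".toList ++ PySem.Chars.join ", ".toList (args.drop 2)
       else []) ++ [')']
  else needleA ++ body

-- reference recursion both ports are reduced to
def specT (cs : List Char) : List Char :=
  if needleA <+: cs then
    emitCallS ((cs.drop 8).take (closeLen (cs.drop 8) 1)) ++
      specT ((cs.drop 8).drop (closeLen (cs.drop 8) 1))
  else
    match cs with
    | [] => []
    | c :: r => c :: specT r
termination_by cs.length
decreasing_by
  · rename_i h
    have h8 : 8 ≤ cs.length := h.length_le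
    simp; omega
  · simp

theorem specT_nil : specT [] = [] := by
  rw [specT.eq_def, if_neg (fun h => by have := h.length_le; simp [needleA] at this)]

theorem specT_cons {c : Char} {r : List Char} (h : ¬ needleA <+: (c :: r)) :
    specT (c :: r) = c :: specT r := by
  rw [specT.eq_def, if_neg h]

theorem specT_no (cs : List Char) (h : ∀ j, ¬ needleA <+: cs.drop j) : specT cs = cs := by
  induction cs with
  | nil => exact specT_nil
  | cons c r ih =>
    rw [specT_cons (by simpa using h 0)]
    rw [ih (fun j => by simpa using h (j + 1))]

theorem specT_split (p : Nat) (cs : List Char)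
    (h : ∀ j < p, ¬ needleA <+: cs.drop j) :
    specT cs = cs.take p ++ specT (cs.drop p) := by
  induction p generalizing cs with
  | zero => simp
  | succ q ih =>
    cases cs with
    | nil => simp
    | cons c r =>
      rw [specT_cons (by simpa using h 0 (by omega))]
      rw [ih r (fun j hj => by simpa using h (j + 1) (by omega))]
      simp

theorem spec_call (cs' : List Char) :
    specT (needleA ++ cs') =
      emitCallS (cs'.take (closeLen cs' 1)) ++ specT (cs'.drop (closeLen cs' 1)) := by
  rw [specT.eq_def, if_pos (List.prefix_append _ _)]
  have h : (needleA ++ cs').drop 8 = cs' := by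
    have : needleA.length = 8 := rfl
    rw [← this, List.drop_left]
  rw [h]

-- find_close_paren's loop, relativized
theorem fc_rel (cs : List Char) (i : Nat) (d : Int) :
    findCloseGoA cs i d = i + closeLen (cs.drop i) d := by
  rw [findCloseGoA]
  split
  next h =>
    have hcons : cs.drop i = cs.getD i ' ' :: cs.drop (i + 1) := by
      rw [List.getD_eq_getElem cs ' ' h.1]
      exact List.drop_eq_getElem_cons h.1
    rw [fc_rel cs (i + 1) _]
    rw [hcons]
    simp only [closeLen, updD]
    rw [if_pos h.2]
    omega
  next h =>
    rcases Nat.lt_or_ge i cs.length with hlt | hge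
    · have hd : d ≤ 0 := by
        by_contra hc
        exact h ⟨hlt, by omega⟩
      rw [closeLen_nonpos _ hd]
      omega
    · rw [List.drop_eq_nil_of_le hge]
      rfl
termination_by cs.length - i
decreasing_by omega

-- the needle has '$' only at position 0
theorem needle_char_ne (j : Nat) (h1 : 1 ≤ j) (h2 : j < 8) : needleA[j]? ≠ some '$' := by
  interval_cases j <;> decide

theorem needle_get? (k : Nat) (hk : k < 8) : needleA[k]? = some (needleA.getD k ' ') := by
  interval_cases k <;> rfl

theorem pref_get? {X sub : List Char} (h : sub <+: X) (m : Nat) (hm : m < sub.length) :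
    X[m]? = sub[m]? := by
  obtain ⟨s, rfl⟩ := h
  exact List.getElem?_append_left hm

theorem no_needle_short {k : Nat} (hk : k < 8) (j : Nat) :
    ¬ needleA <+: (needleA.take k).drop j := by
  intro h
  have := h.length_le
  simp [needleA] at this
  omega

-- a partial match followed by a mismatching character: no occurrence can start inside it
theorem spec_mismatch {k : Nat} (hk : k < 8) {ch : Char}
    (hch : ch ≠ needleA.getD k ' ') (cs' : List Char) :
    specT (needleA.take k ++ ch :: cs') = needleA.take k ++ specT (ch :: cs') := by
  have hlen : (needleA.take k).length = k := by simp [needleA]; omega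
  have hnp : ∀ j < k, ¬ needleA <+: (needleA.take k ++ ch :: cs').drop j := by
    intro j hj hpref
    rw [List.drop_append_of_le_length (by omega)] at hpref
    rcases Nat.eq_zero_or_pos j with rfl | hj1
    · -- occurrence at 0 would force ch = needle[k]
      have h1 := pref_get? hpref k (by simp [needleA]; omega)
      rw [List.drop_zero, List.getElem?_append_right (by omega), hlen,
          Nat.sub_self, needle_get? k hk] at h1
      simp at h1
      exact hch h1
    · -- occurrence at 1 ≤ j < k would force needle[j] = '$'
      have h0 := pref_get? hpref 0 (by simp [needleA])
      rw [List.getElem?_append_left (by simp [hlen]; omega), List.getElem?_drop,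
          Nat.add_zero, List.getElem?_take_of_lt hj] at h0
      have : needleA[0]? = some '$' := rfl
      rw [this] at h0
      exact needle_char_ne j hj1 (by omega) h0
  have := specT_split k (needleA.take k ++ ch :: cs') hnp
  rw [this, List.take_append_of_le_length (by omega), List.take_take,
      List.drop_append_of_le_length (by omega)]
  simp

theorem spec_cons_ne {ch : Char} (hch : ch ≠ '$') (cs' : List Char) :
    specT (ch :: cs') = ch :: specT cs' := by
  apply specT_cons
  intro h
  have h0 := pref_get? h 0 (by simp [needleA])
  have : needleA[0]? = some '$' := rfl
  rw [this] at h0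
  simp at h0
  exact hch h0

theorem dropLast_take {α : Type} {n : Nat} {t : List α} (h : n ≤ t.length) :
    (t.take n).dropLast = t.take (n - 1) := by
  rw [List.dropLast_eq_take, List.take_take]
  simp
  omega

-- tpGoA's three unfolding equations
theorem tpGoA_stop {cs : List Char} {i : Nat} {acc : List (List Char)} (h : ¬ i < cs.length) :
    tpGoA cs i acc = acc := by
  rw [tpGoA, dif_neg h]

theorem tpGoA_none {cs : List Char} {i : Nat} {acc : List (List Char)} (hi2 : i < cs.length)
    (hpos : PySem.Chars.findFrom cs needleA (i : Int) none = -1) :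
    tpGoA cs i acc = acc ++ [PySem.List.slice cs (some (i : Int)) none] := by
  rw [tpGoA, dif_pos hi2]
  exact dif_pos hpos

theorem tpGoA_found {cs : List Char} {i : Nat} {acc : List (List Char)} (hi2 : i < cs.length)
    (hpos : ¬ PySem.Chars.findFrom cs needleA (i : Int) none = -1) :
    tpGoA cs i acc =
      tpGoA cs (findCloseParenA cs ((PySem.Chars.findFrom cs needleA (i : Int) none).toNat + 7))
        (acc ++ [PySem.List.slice cs (some (i : Int)) (some (PySem.Chars.findFrom cs needleA (i : Int) none))] ++
         [(fun args e =>
            if 2 ≤ args.length then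
              (args.getD 0 []) ++ ".bind(".toList ++ (args.getD 1 []) ++
                (if 2 < args.length then ", ".toList ++ PySem.Chars.join ", ".toList (args.drop 2)
                 else []) ++ [')']
            else PySem.List.slice cs (some ((PySem.Chars.findFrom cs needleA (i : Int) none).toNat : Int)) (some (e : Int)))
          (parseArgsA (PySem.List.slice cs
            (some (((PySem.Chars.findFrom cs needleA (i : Int) none).toNat : Int) + 8))
            (some ((findCloseParenA cs ((PySem.Chars.findFrom cs needleA (i : Int) none).toNat + 7) : Int) - 1))))
          (findCloseParenA cs ((PySem.Chars.findFrom cs needleA (i : Int) none).toNat + 7))]) := by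
  rw [tpGoA, dif_pos hi2]
  exact dif_neg hpos

-- ===== A's port equals the reference recursion =====
theorem tpGoA_spec (cs : List Char) (i : Nat) (acc : List (List Char)) (hi : i ≤ cs.length) :
    (tpGoA cs i acc).flatten = acc.flatten ++ specT (cs.drop i) := by
  by_cases hi2 : i < cs.length
  · by_cases hpos : PySem.Chars.findFrom cs needleA (i : Int) none = -1
    · rw [tpGoA_none hi2 hpos]
      have hno : ¬ needleA <:+: cs.drop i :=
        (PySem.Chars.findFrom_natCast_eq_neg_one_iff cs needleA i hi).mp hpos
      have hspec : specT (cs.drop i) = cs.drop i :=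
        specT_no _ (fun j hpref => hno ((hpref.isInfix).trans (List.drop_suffix j _).isInfix))
      rw [PySem.List.slice_from _ (by positivity)]
      simp [hspec]
    · obtain ⟨h_ile, h_pref, h_min⟩ := PySem.Chars.findFrom_natCast_spec cs needleA i hi hpos
      have hpos0 : 0 ≤ PySem.Chars.findFrom cs needleA (i : Int) none :=
        le_trans (by positivity) h_ile
      set p := (PySem.Chars.findFrom cs needleA (i : Int) none).toNat with hp
      have hpcast : PySem.Chars.findFrom cs needleA (i : Int) none = (p : Int) :=
        (Int.toNat_of_nonneg hpos0).symm
      have hip : i ≤ p := by omega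
      have h8 : 8 ≤ (cs.drop p).length := by
        have := h_pref.length_le
        simpa [needleA] using this
      have hp8 : p + 8 ≤ cs.length := by
        rw [List.length_drop] at h8; omega
      obtain ⟨t0, ht0⟩ := h_pref
      have ht : cs.drop (p + 8) = t0 := by
        have h1 : cs.drop (p + 8) = (cs.drop p).drop 8 := by rw [List.drop_drop]
        rw [h1, ← ht0]
        have h2 : needleA.length = 8 := rfl
        rw [← h2, List.drop_left]
      set t := cs.drop (p + 8) with htdef
      set n := closeLen t 1 with hn
      have hnle : n ≤ t.length := closeLen_le t 1
      have htlen : t.length = cs.length - (p + 8) := by rw [htdef, List.length_drop]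
      have he : findCloseParenA cs (p + 7) = p + 8 + n := by
        rw [findCloseParenA, fc_rel]
      have hinner : PySem.List.slice cs (some ((p : Int) + 8)) (some (((p + 8 + n : Nat) : Int) - 1))
          = t.take (n - 1) := by
        have h1 : ((p : Int) + 8) = ((p + 8 : Nat) : Int) := by push_cast; ring
        have h2 : ((p + 8 + n : Nat) : Int) - 1 = ((p + 8 + n - 1 : Nat) : Int) := by push_cast; omega
        rw [h1, h2, PySem.List.slice_natCast]
        have h3 : p + 8 + n - 1 - (p + 8) = n - 1 := by omega
        rw [h3, htdef]
      have hfall : PySem.List.slice cs (some ((p : Nat) : Int)) (some ((p + 8 + n : Nat) : Int))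
          = needleA ++ t.take n := by
        rw [PySem.List.slice_natCast]
        have h3 : p + 8 + n - p = 8 + n := by omega
        rw [h3, ← ht0, List.take_append]
        have h4 : needleA.take (8 + n) = needleA := List.take_of_length_le (by simp [needleA])
        have h5 : 8 + n - needleA.length = n := by simp [needleA]
        rw [h4, h5, ht]
      have hbody : (t.take n).dropLast = t.take (n - 1) := dropLast_take hnle
      have hs1 : PySem.List.slice cs (some (i : Int)) (some (PySem.Chars.findFrom cs needleA (i : Int) none))
          = (cs.drop i).take (p - i) := by
        rw [hpcast, PySem.List.slice_natCast]
      have hsplit : specT (cs.drop i) =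
          (cs.drop i).take (p - i) ++ (emitCallS (t.take n) ++ specT (t.drop n)) := by
        rw [specT_split (p - i) (cs.drop i) (fun j hj => by
          rw [List.drop_drop]
          exact h_min (i + j) (by omega) (by omega))]
        congr 1
        rw [List.drop_drop]
        have h6 : i + (p - i) = p := by omega
        rw [h6, ← ht0, spec_call, hn, ht]
      rw [tpGoA_found hi2 hpos, he]
      rw [tpGoA_spec cs (p + 8 + n) _ (by omega)]
      rw [hsplit]
      have hdrop2 : cs.drop (p + 8 + n) = t.drop n := by
        rw [htdef, List.drop_drop]
      rw [hdrop2, hs1]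
      simp only [List.flatten_append, List.flatten_cons, List.flatten_nil, List.append_nil,
        List.append_assoc]
      congr 2
      rw [hinner, hfall]
      rw [emitCallS]
      simp only [hbody, List.append_assoc]
  · rw [tpGoA_stop hi2]
    have : i = cs.length := by omega
    subst this
    rw [List.drop_length, specT_nil, List.append_nil]
termination_by cs.length - i
decreasing_by omega

-- compact views of the shared emission/flush code
def flushF (t : List (List Char) × List Char × Int) : List (List Char) :=
  if t.2.1 ≠ [] then t.1 ++ [PySem.Chars.strip t.2.1] else t.1

def pieceOf (args2 : List (List Char)) (raw : List Char) : List Char :=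
  if 2 ≤ args2.length then
    (args2.getD 0 []) ++ ".bind(".toList ++ (args2.getD 1 []) ++
      (if 2 < args2.length then ", ".toList ++ PySem.Chars.join ", ".toList (args2.drop 2)
       else []) ++ [')']
  else raw

theorem parseArgsA_eq (s : List Char) :
    parseArgsA s = flushF (s.foldl parseStepA ([], [], 0)) := rfl

theorem emitCallS_eq (body : List Char) :
    emitCallS body = pieceOf (parseArgsA body.dropLast) (needleA ++ body) := rfl

-- ===== B's port equals the reference recursion =====
theorem bInv (cs : List Char) :
    (∀ st : PvBSt, st.incall = false → st.k < 8 →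
       (bFinal (cs.foldl bStep st)).flatten
         = st.out.flatten ++ specT (needleA.take st.k ++ cs))
    ∧ (∀ (st : PvBSt) (u : List Char), st.incall = true →
         st.raw = needleA ++ u → st.pend = u.getLast? →
         (st.args, st.cur, st.dbr) = (u.dropLast).foldl parseStepA ([], [], 0) →
         st.k = 0 →
         (∀ x, closeLen (u ++ x) 1 = u.length + closeLen x st.dpar) →
         1 ≤ st.dpar →
         (bFinal (cs.foldl bStep st)).flatten
           = st.out.flatten ++ emitCallS ((u ++ cs).take (closeLen (u ++ cs) 1))
               ++ specT ((u ++ cs).drop (closeLen (u ++ cs) 1))) := by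
  induction cs with
  | nil =>
    constructor
    · rintro ⟨out, k, incall, raw, args, cur, pend, dpar, dbr⟩ hin hk
      dsimp only at hin hk ⊢
      subst hin
      simp only [List.foldl_nil, bFinal, if_neg (by simp : ¬ (false = true))]
      rw [List.append_nil, specT_no _ (no_needle_short hk)]
      simp [needleB, needleA]
    · rintro ⟨out, k, incall, raw, args, cur, pend, dpar, dbr⟩ u hin hraw hpend hparse hk hdp hdp1
      dsimp only at hin hraw hpend hparse hk hdp hdp1 ⊢
      subst hin hraw hk
      have hN : closeLen (u ++ []) 1 = u.length := by
        have h0 := hdp []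
        simpa [closeLen] using h0
      rw [List.foldl_nil, hN, List.append_nil, List.take_length, List.drop_length, specT_nil,
        List.append_nil]
      simp only [bFinal]
      have hpa : parseArgsA u.dropLast = (if cur ≠ [] then args ++ [PySem.Chars.strip cur] else args) := by
        rw [parseArgsA, ← hparse]
      rw [emitCallS]
      simp only [← hpa]
      simp [List.flatten_append]
  | cons ch cs' ih =>
    constructor
    · rintro ⟨out, k, incall, raw, args, cur, pend, dpar, dbr⟩ hin hk
      dsimp only at hin hk ⊢
      subst hin
      rw [List.foldl_cons]
      by_cases hch : ch = needleB.getD k ' '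
      · by_cases hk8 : k + 1 = needleB.length
        · -- the needle completes: enter call mode
          have hk7 : k = 7 := by simp [needleB] at hk8; omega
          subst hk7
          have hstep : bStep ⟨out, 7, false, raw, args, cur, pend, dpar, dbr⟩ ch =
              ⟨out, 0, true, needleB, [], [], none, 1, 0⟩ := by
            simp [bStep, hch, hk8]
          rw [hstep]
          have h2 := (ih).2 ⟨out, 0, true, needleB, [], [], none, 1, 0⟩ [] rfl (by simp [needleB, needleA]) rfl rfl rfl (fun x => by simp) (by norm_num)
          dsimp only at h2
          rw [h2]
          have hx : needleA.take 7 ++ ch :: cs' = needleA ++ cs' := by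
            subst hch; rfl
          rw [hx, spec_call]
          simp
        · -- the match advances
          have hstep : bStep ⟨out, k, false, raw, args, cur, pend, dpar, dbr⟩ ch =
              ⟨out, k + 1, false, raw, args, cur, pend, dpar, dbr⟩ := by
            simp [bStep, hch, hk8]
          rw [hstep]
          have hk1 : k + 1 < 8 := by simp [needleB] at hk8; omega
          have h1 := (ih).1 ⟨out, k + 1, false, raw, args, cur, pend, dpar, dbr⟩ rfl hk1
          dsimp only at h1
          rw [h1]
          subst hch
          have hx : needleA.take k ++ needleB.getD k ' ' :: cs' = needleA.take (k + 1) ++ cs' := by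
            interval_cases k <;> rfl
          rw [hx]
      · -- mismatch: flush the partial match
        have hchA : ch ≠ needleA.getD k ' ' := by simpa [needleB, needleA] using hch
        rw [spec_mismatch hk hchA]
        by_cases hd : ch = '$'
        · have hch2 : ¬ ('$' = needleB[k]?.getD ' ') := by
            simpa [hd, List.getD_eq_getElem?_getD] using hch
          have hstep : bStep ⟨out, k, false, raw, args, cur, pend, dpar, dbr⟩ ch =
              ⟨out ++ [needleB.take k], 1, false, raw, args, cur, pend, dpar, dbr⟩ := by
            subst hd
            simp [bStep, hch2]
          rw [hstep]
          have h1 := (ih).1 ⟨out ++ [needleB.take k], 1, false, raw, args, cur, pend, dpar, dbr⟩ rfl (by norm_num)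
          dsimp only at h1
          rw [h1]
          have hx : needleA.take 1 ++ cs' = ch :: cs' := by subst hd; rfl
          rw [hx]
          simp [needleB, needleA]
        · have hch2 : ¬ (ch = needleB[k]?.getD ' ') := by
            simpa [List.getD_eq_getElem?_getD] using hch
          have hstep : bStep ⟨out, k, false, raw, args, cur, pend, dpar, dbr⟩ ch =
              ⟨out ++ [needleB.take k] ++ [[ch]], 0, false, raw, args, cur, pend, dpar, dbr⟩ := by
            simp [bStep, hch2, hd]
          rw [hstep]
          have h1 := (ih).1 ⟨out ++ [needleB.take k] ++ [[ch]], 0, false, raw, args, cur, pend, dpar, dbr⟩ rfl (by norm_num)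
          dsimp only at h1
          rw [h1, spec_cons_ne hd]
          simp [needleB, needleA]
    · rintro ⟨out, k, incall, raw, args, cur, pend, dpar, dbr⟩ u hin hraw hpend hparse hk hdp hdp1
      dsimp only at hin hraw hpend hparse hk hdp hdp1 ⊢
      subst hin hraw hpend hk
      rw [List.foldl_cons]
      have hT : bStep ⟨out, 0, true, needleA ++ u, args, cur, u.getLast?, dpar, dbr⟩ ch =
          (if ch = ')' ∧ updD dpar ch = 0 then
            { out := out ++ [pieceOf (flushF (u.foldl parseStepA ([], [], 0))) ((needleA ++ u) ++ [ch])],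
              k := 0, incall := false, raw := (needleA ++ u) ++ [ch],
              args := (u.foldl parseStepA ([], [], 0)).1,
              cur := (u.foldl parseStepA ([], [], 0)).2.1, pend := none,
              dpar := updD dpar ch, dbr := (u.foldl parseStepA ([], [], 0)).2.2 }
          else
            { out := out, k := 0, incall := true, raw := (needleA ++ u) ++ [ch],
              args := (u.foldl parseStepA ([], [], 0)).1,
              cur := (u.foldl parseStepA ([], [], 0)).2.1, pend := some ch,
              dpar := updD dpar ch, dbr := (u.foldl parseStepA ([], [], 0)).2.2 }) := by
        rcases List.eq_nil_or_concat' u with rfl | ⟨u', c, rfl⟩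
        · simp only [List.dropLast_nil, List.foldl_nil] at hparse
          rw [← hparse]
          simp [bStep, updD, flushF, pieceOf]
        · rw [List.dropLast_concat] at hparse
          rw [List.getLast?_concat, List.foldl_concat, ← hparse]
          simp [bStep, updD, flushF, pieceOf, parseStepA]
      rw [hT]
      by_cases hcl : (ch = ')' ∧ updD dpar ch = 0)
      · rw [if_pos hcl]
        obtain ⟨hch, hd0⟩ := hcl
        have h1 := (ih).1
          ⟨out ++ [pieceOf (flushF (u.foldl parseStepA ([], [], 0))) ((needleA ++ u) ++ [ch])],
            0, false, (needleA ++ u) ++ [ch],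
            (u.foldl parseStepA ([], [], 0)).1, (u.foldl parseStepA ([], [], 0)).2.1, none,
            updD dpar ch, (u.foldl parseStepA ([], [], 0)).2.2⟩ rfl (by norm_num)
        dsimp only at h1
        rw [h1]
        have hN : closeLen (u ++ ch :: cs') 1 = u.length + 1 := by
          rw [hdp (ch :: cs')]
          have : closeLen (ch :: cs') dpar = 1 + closeLen cs' (updD dpar ch) := by
            simp only [closeLen]
            rw [if_pos (by omega)]
          rw [this, hd0, closeLen_nonpos cs' (by omega)]
        have hulen : (u ++ [ch]).length = u.length + 1 := by simp
        have htk : (u ++ ch :: cs').take (u.length + 1) = u ++ [ch] := by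
          rw [List.append_cons, ← hulen, List.take_left]
        have hdr : (u ++ ch :: cs').drop (u.length + 1) = cs' := by
          rw [List.append_cons, ← hulen, List.drop_left]
        rw [hN, htk, hdr]
        rw [emitCallS_eq, List.dropLast_concat, parseArgsA_eq]
        simp [List.flatten_append, List.append_assoc]
      · rw [if_neg hcl]
        have hdp1' : 1 ≤ updD dpar ch := by
          by_cases h1 : ch = '('
          · simp [updD, h1]; omega
          · by_cases h2 : ch = ')'
            · have : updD dpar ch = dpar - 1 := by simp [updD, h1, h2]
              have hne : ¬ updD dpar ch = 0 := fun hc => hcl ⟨h2, hc⟩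
              omega
            · have : updD dpar ch = dpar := by simp [updD, h1, h2]
              omega
        have hdp' : ∀ x, closeLen ((u ++ [ch]) ++ x) 1 = (u ++ [ch]).length + closeLen x (updD dpar ch) := by
          intro x
          rw [← List.append_cons, hdp (ch :: x)]
          have : closeLen (ch :: x) dpar = 1 + closeLen x (updD dpar ch) := by
            simp only [closeLen]
            rw [if_pos (by omega)]
          rw [this]
          simp
          omega
        have h2 := (ih).2
          ⟨out, 0, true, (needleA ++ u) ++ [ch],
            (u.foldl parseStepA ([], [], 0)).1, (u.foldl parseStepA ([], [], 0)).2.1, some ch,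
            updD dpar ch, (u.foldl parseStepA ([], [], 0)).2.2⟩ (u ++ [ch]) rfl
          (by simp) (by rw [List.getLast?_concat]) (by rw [List.dropLast_concat])
          rfl hdp' hdp1'
        dsimp only at h2
        rw [h2]
        rw [← List.append_cons]

-- ===== VERDICT (by name: the statement is the Claim_ definition above) =====
theorem transform_proxy_spec : Claim_equal_transform_proxy := by
  intro content _
  show transform_proxy content = transform_proxy_alt content
  unfold transform_proxy transform_proxy_alt
  rw [pvJoinNil, pvJoinNil]
  congr 1
  have hA := tpGoA_spec content.toList 0 [] (by omega)
  have hB := (bInv content.toList).1 ⟨[], 0, false, [], [], [], none, 0, 0⟩ rfl (by norm_num)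
  simp at hA hB
  rw [hA, hB]
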